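-- pv_equiv track=rewrite | github.com/ElderMedic/FAIRiAgent | fairifier/services/fairds_api_parser.py | get_fields_by_requirement
-- ===== SOURCE A (Python) =====
-- from typing import Dict, List, Any, Optional
--
-- def get_fields_by_requirement(
--     fields: List[Dict[str, Any]]
-- ) -> Dict[str, List[Dict[str, Any]]]:
--     """
--     将字段按 requirement level 分组
--
--     Returns:
--         {
--             "mandatory": [...],
--             "recommended": [...],
--             "optional": [...]
--         }
--     """
--     result = {
--         "mandatory": [],
--         "recommended": [],
--         "optional": []
--     }
--
--     for field in fields:
--         req = field.get("requirement", "OPTIONAL").upper()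
--         if req == "MANDATORY":
--             result["mandatory"].append(field)
--         elif req == "RECOMMENDED":
--             result["recommended"].append(field)
--         else:
--             result["optional"].append(field)
--
--     return result
-- ===== SOURCE B (Python) =====
-- from typing import Dict, List, Any
--
-- def get_fields_by_requirement(
--     fields: List[Dict[str, Any]]
-- ) -> Dict[str, List[Dict[str, Any]]]:
--     def req(f):
--         return f.get("requirement", "OPTIONAL").upper()
--     return {
--         "mandatory": [f for f in fields if req(f) == "MANDATORY"],
--         "recommended": [f for f in fields if req(f) == "RECOMMENDED"],
--         "optional": [f for f in fields if req(f) not in ("MANDATORY", "RECOMMENDED")],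
--     }
-- ===== Notes on version B (the rewrite author's own statement) =====
-- stated objective: alternative
-- what changed: Replaced the single bucketing loop with three accumulators by three independent filtering comprehensions, one per requirement level, with the catch-all filter mirroring the else branch.
import Mathlib
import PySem

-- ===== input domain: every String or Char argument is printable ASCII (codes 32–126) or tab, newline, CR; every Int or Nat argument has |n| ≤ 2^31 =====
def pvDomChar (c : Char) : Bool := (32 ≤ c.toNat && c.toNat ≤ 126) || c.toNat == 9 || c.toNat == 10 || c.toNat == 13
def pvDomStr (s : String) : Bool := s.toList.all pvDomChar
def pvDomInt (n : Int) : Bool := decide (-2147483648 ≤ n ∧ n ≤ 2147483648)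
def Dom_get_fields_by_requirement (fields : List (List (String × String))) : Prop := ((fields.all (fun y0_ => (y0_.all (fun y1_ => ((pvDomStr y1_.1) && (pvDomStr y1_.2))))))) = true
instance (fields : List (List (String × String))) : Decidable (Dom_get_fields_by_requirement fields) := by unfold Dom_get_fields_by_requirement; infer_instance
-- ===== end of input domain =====

-- B replaces A's single bucketing loop by three independent filter passes; same return value (alternative decomposition, not faster).

-- ===== PORT A =====
-- field.get("requirement", "OPTIONAL").upper()
def pvReqA (field : List (String × String)) : String :=
  PySem.Str.upper (PySem.Dict.getD (PySem.Dict.mk field) "requirement" "OPTIONAL")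

def get_fields_by_requirement (fields : List (List (String × String))) : List (String × List (List (String × String))) :=
  let res := fields.foldl
    (fun (acc : List (List (String × String)) × List (List (String × String)) × List (List (String × String))) field =>
      let req := pvReqA field
      if req == "MANDATORY" then (acc.1 ++ [field], acc.2.1, acc.2.2)
      else if req == "RECOMMENDED" then (acc.1, acc.2.1 ++ [field], acc.2.2)
      else (acc.1, acc.2.1, acc.2.2 ++ [field]))
    ([], [], [])
  [("mandatory", res.1), ("recommended", res.2.1), ("optional", res.2.2)]

-- ===== PORT B =====
def pvReqB (field : List (String × String)) : String :=
  PySem.Str.upper (PySem.Dict.getD (PySem.Dict.mk field) "requirement" "OPTIONAL")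

def get_fields_by_requirement_alt (fields : List (List (String × String))) : List (String × List (List (String × String))) :=
  [("mandatory", fields.filter (fun f => pvReqB f == "MANDATORY")),
   ("recommended", fields.filter (fun f => pvReqB f == "RECOMMENDED")),
   ("optional", fields.filter (fun f => !(pvReqB f == "MANDATORY") && !(pvReqB f == "RECOMMENDED")))]

-- ===== PRECONDITION & SPEC =====
def Spec_get_fields_by_requirement (fields : List (List (String × String))) (out : List (String × List (List (String × String)))) : Prop := out = get_fields_by_requirement_alt fields
instance (fields : List (List (String × String))) (out : List (String × List (List (String × String)))) : Decidable (Spec_get_fields_by_requirement fields out) := by unfold Spec_get_fields_by_requirement; infer_instance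

-- ===== CLAIM (what is proved, stated in full; the proofs are below) =====
def Claim_equal_get_fields_by_requirement : Prop := ∀ (fields : List (List (String × String))), Dom_get_fields_by_requirement fields → Spec_get_fields_by_requirement fields (get_fields_by_requirement fields)

-- ===== LEMMAS AND PROOFS =====
theorem gfbr_foldl_inv (fields : List (List (String × String)))
    (m r o : List (List (String × String))) :
    fields.foldl
      (fun (acc : List (List (String × String)) × List (List (String × String)) × List (List (String × String))) field =>
        let req := pvReqA field
        if req == "MANDATORY" then (acc.1 ++ [field], acc.2.1, acc.2.2)
        else if req == "RECOMMENDED" then (acc.1, acc.2.1 ++ [field], acc.2.2)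
        else (acc.1, acc.2.1, acc.2.2 ++ [field]))
      (m, r, o)
    = (m ++ fields.filter (fun f => pvReqA f == "MANDATORY"),
       r ++ fields.filter (fun f => pvReqA f == "RECOMMENDED"),
       o ++ fields.filter (fun f => !(pvReqA f == "MANDATORY") && !(pvReqA f == "RECOMMENDED"))) := by
  induction fields generalizing m r o with
  | nil => simp
  | cons f fs ih =>
    simp only [List.foldl_cons, List.filter_cons, beq_iff_eq] at ih ⊢
    by_cases h1 : pvReqA f = "MANDATORY"
    · simp [h1, ih]
    · by_cases h2 : pvReqA f = "RECOMMENDED"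
      · simp [h1, h2, ih]
      · simp [h1, h2, ih]

-- ===== VERDICT (by name: the statement is the Claim_ definition above) =====
theorem get_fields_by_requirement_spec : Claim_equal_get_fields_by_requirement := by
  intro fields _
  show _ = _
  simp only [get_fields_by_requirement, get_fields_by_requirement_alt, gfbr_foldl_inv]
  rfl
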